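-- pv_equiv track=rewrite | github.com/juanifiore/labo-datos | clase-2.py | geringoso
-- ===== SOURCE A (Python) =====
-- def geringoso(palabra):
--     silaba = ['pa','pe','pi','po','pu']
--     vocales = ['a','e','i','o','u']
--     papalapabrapa = ''
--     l = len(palabra)
--     for i in range(0,l):
--         papalapabrapa = papalapabrapa + palabra[i]
--         for j in range (0,5):
--             if vocales[j] == palabra[i] and i < l-1 and palabra[i+1] not in vocales:
--                 papalapabrapa = papalapabrapa + silaba[j]
--         if i == l-1 and palabra[i] in vocales:
--             for j in range(0,5):
--                 if palabra[i] == vocales[j]: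
--                     papalapabrapa += silaba[j]
--     return papalapabrapa
-- ===== SOURCE B (Python) =====
-- def geringoso(palabra):
--     vocales = 'aeiou'
--     out = []
--     rest = palabra
--     while rest:
--         v = rest[0] in vocales
--         k = 1
--         while k < len(rest) and (rest[k] in vocales) == v:
--             k += 1
--         run = rest[:k]
--         out.append(run + 'p' + run[-1] if v else run)
--         rest = rest[k:]
--     return ''.join(out)
-- ===== Notes on version B (the rewrite author's own statement) =====
-- stated objective: alternative
-- what changed: A scans character by character with a one-character lookahead and, per character, two inner 5-element table scans; B instead decomposes the string into maximal runs of vowels/non-vowels and emits each run at once, appending one syllable (letter p followed by the run's last vowel) per vowel run, since only the last vowel of a run is not followed by a vowel.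
import Mathlib
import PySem

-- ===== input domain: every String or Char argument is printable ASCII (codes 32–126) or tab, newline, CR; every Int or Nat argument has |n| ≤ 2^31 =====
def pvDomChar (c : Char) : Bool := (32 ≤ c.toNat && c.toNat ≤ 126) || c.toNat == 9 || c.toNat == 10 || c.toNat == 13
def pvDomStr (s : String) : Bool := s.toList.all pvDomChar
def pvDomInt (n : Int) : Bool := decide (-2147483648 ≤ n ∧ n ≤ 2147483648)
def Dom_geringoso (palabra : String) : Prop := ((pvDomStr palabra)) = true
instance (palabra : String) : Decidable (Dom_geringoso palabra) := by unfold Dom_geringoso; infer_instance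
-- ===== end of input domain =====

-- B decomposes the string into maximal vowel/non-vowel runs and appends one
-- syllable (letter p then the run's last vowel) per vowel run, instead of A's
-- per-character loop with lookahead and inner table scans (alternative algorithm).

-- ===== PORT A =====
-- literal transliteration of A: indexed loop, inner scans over the 5 vowels
def geringoso (palabra : String) : String :=
  let silaba : List (List Char) := [['p','a'],['p','e'],['p','i'],['p','o'],['p','u']]
  let vocales : List Char := ['a','e','i','o','u']
  let cs : List Char := palabra.toList
  let l : Int := cs.length
  let res : List Char := (PySem.List.pyRange 0 l).foldl (fun pap i =>
    let pap := pap ++ [PySem.List.pyGetD cs i ' ']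
    let pap := (PySem.List.pyRange 0 5).foldl (fun pap j =>
      if PySem.List.pyGetD vocales j ' ' = PySem.List.pyGetD cs i ' ' ∧ i < l - 1 ∧
         PySem.List.pyGetD cs (i+1) ' ' ∉ vocales
      then pap ++ PySem.List.pyGetD silaba j [] else pap) pap
    if i = l - 1 ∧ PySem.List.pyGetD cs i ' ' ∈ vocales then
      (PySem.List.pyRange 0 5).foldl (fun pap j =>
        if PySem.List.pyGetD cs i ' ' = PySem.List.pyGetD vocales j ' '
        then pap ++ PySem.List.pyGetD silaba j [] else pap) pap
    else pap) ([] : List Char)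
  String.ofList res

-- ===== PORT B =====
-- literal transliteration of Source B: peel off the maximal same-class run at the
-- front (inner while counting k), emit it (plus 'p'+run[-1] for a vowel run),
-- recurse on the remainder
def altVoc : List Char := ['a','e','i','o','u']

-- inner while loop of Source B: how many further chars share the class v
def altK (v : Bool) : List Char → Nat
  | [] => 0
  | c :: t => if altVoc.contains c = v then altK v t + 1 else 0

def altGo : List Char → List Char
  | [] => []
  | c :: t =>
    let v := altVoc.contains c
    let k := 1 + altK v t
    let run := (c :: t).take k
    let piece := if v then run ++ ['p', run.getLastD ' '] else run
    piece ++ altGo ((c :: t).drop k)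
termination_by cs => cs.length
decreasing_by simp

def geringoso_alt (palabra : String) : String :=
  String.ofList (altGo palabra.toList)

-- ===== PRECONDITION & SPEC =====
def Spec_geringoso (palabra : String) (out : String) : Prop := out = geringoso_alt palabra
instance (palabra : String) (out : String) : Decidable (Spec_geringoso palabra out) := by unfold Spec_geringoso; infer_instance

-- ===== CLAIM (what is proved, stated in full; the proofs are below) =====
def Claim_equal_geringoso : Prop := ∀ (palabra : String), Dom_geringoso palabra → Spec_geringoso palabra (geringoso palabra)

-- ===== LEMMAS AND PROOFS =====

-- common specification: per-character expansion with lookahead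
def pvE (c : Char) (n : Option Char) : List Char :=
  if ['a','e','i','o','u'].contains c &&
     (match n with | none => true | some d => !(['a','e','i','o','u'].contains d))
  then [c, 'p', c] else [c]

def pvSpec : List Char → List Char
  | [] => []
  | c :: rest => pvE c rest.head? ++ pvSpec rest

-- A's per-index expansion
def pvH (cs : List Char) (l : Int) (i : Int) : List Char :=
  PySem.List.pyGetD cs i ' ' ::
    (if PySem.List.pyGetD cs i ' ' ∈ ['a','e','i','o','u'] ∧
        (i = l - 1 ∨ (i < l - 1 ∧ PySem.List.pyGetD cs (i+1) ' ' ∉ ['a','e','i','o','u']))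
     then ['p', PySem.List.pyGetD cs i ' '] else [])

lemma pvRange5 : PySem.List.pyRange 0 5 = [0,1,2,3,4] := by decide

lemma inner5A (x : Char) (C : Prop) [Decidable C] (acc : List Char) :
    List.foldl (fun pap j =>
      if PySem.List.pyGetD ['a','e','i','o','u'] j ' ' = x ∧ C
      then pap ++ PySem.List.pyGetD [['p','a'],['p','e'],['p','i'],['p','o'],['p','u']] j [] else pap)
      acc [0,1,2,3,4]
    = acc ++ (if x ∈ ['a','e','i','o','u'] ∧ C then ['p', x] else []) := by
  by_cases hC : C
  · by_cases hx : x ∈ ['a','e','i','o','u']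
    · simp only [List.mem_cons, List.not_mem_nil, or_false] at hx
      rcases hx with rfl | rfl | rfl | rfl | rfl <;>
        simp [PySem.List.pyGetD, hC]
    · have hx' : ¬(x = 'a' ∨ x = 'e' ∨ x = 'i' ∨ x = 'o' ∨ x = 'u') := by
        simpa using hx
      push Not at hx'
      obtain ⟨h1, h2, h3, h4, h5⟩ := hx'
      simp [PySem.List.pyGetD, hC, h1, h2, h3, h4, h5,
            Ne.symm h1, Ne.symm h2, Ne.symm h3, Ne.symm h4, Ne.symm h5]
  · simp [hC]

lemma inner5B (x : Char) (acc : List Char) :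
    List.foldl (fun pap j =>
      if x = PySem.List.pyGetD ['a','e','i','o','u'] j ' '
      then pap ++ PySem.List.pyGetD [['p','a'],['p','e'],['p','i'],['p','o'],['p','u']] j [] else pap)
      acc [0,1,2,3,4]
    = acc ++ (if x ∈ ['a','e','i','o','u'] then ['p', x] else []) := by
  by_cases hx : x ∈ ['a','e','i','o','u']
  · simp only [List.mem_cons, List.not_mem_nil, or_false] at hx
    rcases hx with rfl | rfl | rfl | rfl | rfl <;>
      simp [PySem.List.pyGetD]
  · have hx' : ¬(x = 'a' ∨ x = 'e' ∨ x = 'i' ∨ x = 'o' ∨ x = 'u') := by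
      simpa using hx
    push Not at hx'
    obtain ⟨h1, h2, h3, h4, h5⟩ := hx'
    simp [PySem.List.pyGetD, h1, h2, h3, h4, h5]

-- A's loop body (in its zeta-reduced form) produces exactly acc ++ pvH cs l i
lemma bodyA (cs : List Char) (l : Int) (acc : List Char) (i : Int) :
    (if i = l - 1 ∧ PySem.List.pyGetD cs i ' ' ∈ ['a','e','i','o','u'] then
      List.foldl (fun pap j =>
        if PySem.List.pyGetD cs i ' ' = PySem.List.pyGetD ['a','e','i','o','u'] j ' '
        then pap ++ PySem.List.pyGetD [['p','a'],['p','e'],['p','i'],['p','o'],['p','u']] j [] else pap)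
        (List.foldl (fun pap j =>
          if PySem.List.pyGetD ['a','e','i','o','u'] j ' ' = PySem.List.pyGetD cs i ' ' ∧ i < l - 1 ∧
             PySem.List.pyGetD cs (i+1) ' ' ∉ ['a','e','i','o','u']
          then pap ++ PySem.List.pyGetD [['p','a'],['p','e'],['p','i'],['p','o'],['p','u']] j [] else pap)
          (acc ++ [PySem.List.pyGetD cs i ' ']) (PySem.List.pyRange 0 5))
        (PySem.List.pyRange 0 5)
    else
      List.foldl (fun pap j =>
        if PySem.List.pyGetD ['a','e','i','o','u'] j ' ' = PySem.List.pyGetD cs i ' ' ∧ i < l - 1 ∧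
           PySem.List.pyGetD cs (i+1) ' ' ∉ ['a','e','i','o','u']
        then pap ++ PySem.List.pyGetD [['p','a'],['p','e'],['p','i'],['p','o'],['p','u']] j [] else pap)
        (acc ++ [PySem.List.pyGetD cs i ' ']) (PySem.List.pyRange 0 5))
    = acc ++ pvH cs l i := by
  simp only [pvRange5]
  rw [inner5A]
  by_cases hl : i = l - 1
  · have hC : ¬ (PySem.List.pyGetD cs i ' ' ∈ ['a','e','i','o','u'] ∧
        (i < l - 1 ∧ PySem.List.pyGetD cs (i+1) ' ' ∉ ['a','e','i','o','u'])) := by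
      intro h; omega
    rw [if_neg hC, List.append_nil]
    by_cases hv : PySem.List.pyGetD cs i ' ' ∈ ['a','e','i','o','u']
    · rw [if_pos ⟨hl, hv⟩, inner5B, if_pos hv]
      unfold pvH
      rw [if_pos ⟨hv, Or.inl hl⟩]
      simp
    · rw [if_neg (by tauto)]
      unfold pvH
      rw [if_neg (by tauto)]
  · rw [if_neg (by tauto)]
    unfold pvH
    by_cases hv : PySem.List.pyGetD cs i ' ' ∈ ['a','e','i','o','u'] ∧
        (i < l - 1 ∧ PySem.List.pyGetD cs (i+1) ' ' ∉ ['a','e','i','o','u'])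
    · rw [if_pos hv, if_pos ⟨hv.1, Or.inr hv.2⟩]
      simp
    · rw [if_neg hv, if_neg (by tauto)]
      simp

-- pvH shifts under cons
lemma pvH_succ (c : Char) (rest : List Char) (k : Nat) :
    pvH (c :: rest) ((rest.length : Int) + 1) ((k : Int) + 1)
    = pvH rest (rest.length : Int) (k : Int) := by
  have e1 : ((k : Int) + 1) = ((k + 1 : Nat) : Int) := by push_cast; ring
  have e2 : (((k + 1 : Nat) : Int) + 1) = ((k + 2 : Nat) : Int) := by push_cast; ring
  have e3 : (c :: rest).getD (k + 2) ' ' = rest.getD (k + 1) ' ' := rfl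
  have hiff1 : (((k + 1 : Nat) : Int) = (rest.length : Int) + 1 - 1) ↔
      ((k : Int) = (rest.length : Int) - 1) := by push_cast; omega
  have hiff2 : (((k + 1 : Nat) : Int) < (rest.length : Int) + 1 - 1) ↔
      ((k : Int) < (rest.length : Int) - 1) := by push_cast; omega
  simp only [pvH, e1, e2, PySem.List.pyGetD_natCast, List.getD_cons_succ, e3, hiff1, hiff2]

-- head of pvH on a cons
lemma pvH_zero (c : Char) (rest : List Char) :
    pvH (c :: rest) ((rest.length : Int) + 1) 0 = pvE c rest.head? := by
  cases rest with
  | nil =>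
    by_cases hc : c ∈ ['a','e','i','o','u'] <;>
      simp [pvH, pvE, PySem.List.pyGetD, List.contains_eq_mem, hc]
  | cons d r =>
    have h1 : PySem.List.pyGetD (c :: d :: r) 0 ' ' = c := PySem.List.pyGetD_zero_cons _ _ _
    have h2 : PySem.List.pyGetD (c :: d :: r) ((0:Int)+1) ' ' = d := by
      have e : ((0:Int)+1) = ((1:Nat):Int) := by norm_num
      rw [e, PySem.List.pyGetD_natCast]; rfl
    have hpos : (0:Int) < ((d :: r).length : Int) := by exact_mod_cast Nat.succ_pos r.length
    have h3 : ¬ ((0:Int) = ((d :: r).length : Int) + 1 - 1) := by omega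
    have h4 : (0:Int) < ((d :: r).length : Int) + 1 - 1 := by omega
    simp only [pvH, h1, h2, h3, h4, false_or, true_and, pvE, List.head?_cons]
    by_cases hc : c ∈ ['a','e','i','o','u'] <;> by_cases hd : d ∈ ['a','e','i','o','u'] <;>
      simp [hc, hd, List.contains_eq_mem]

-- A's flatMap form equals pvSpec
lemma flat_eq_spec : ∀ cs : List Char,
    (List.range cs.length).flatMap (fun (k : Nat) => pvH cs (cs.length : Int) (k : Int)) = pvSpec cs := by
  intro cs
  induction cs with
  | nil => simp [pvSpec]
  | cons c rest ih =>
    rw [List.length_cons, List.range_succ_eq_map, List.flatMap_cons, List.flatMap_map]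
    have hcast : ((rest.length + 1 : Nat) : Int) = (rest.length : Int) + 1 := by push_cast; ring
    rw [hcast]
    have hhead : pvH (c :: rest) ((rest.length : Int) + 1) ((0 : Nat) : Int)
        = pvE c rest.head? := by exact_mod_cast pvH_zero c rest
    have htail : List.flatMap
        (fun (a : Nat) => pvH (c :: rest) ((rest.length : Int) + 1) ((a.succ : Nat) : Int))
        (List.range rest.length)
        = List.flatMap (fun (k : Nat) => pvH rest (rest.length : Int) (k : Int))
            (List.range rest.length) := by
      apply List.flatMap_congr
      intro k _
      have e : ((k.succ : Nat) : Int) = (k : Int) + 1 := by push_cast; ring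
      rw [e, pvH_succ]
    rw [hhead, htail, ih]
    rfl

-- A equals the flatMap form
lemma A_eq (palabra : String) :
    geringoso palabra
    = String.ofList ((List.range palabra.toList.length).flatMap
        (fun (k : Nat) => pvH palabra.toList (palabra.toList.length : Int) (k : Int))) := by
  unfold geringoso
  simp only []
  refine congrArg String.ofList (Eq.trans (PySem.List.foldl_congr_mem _ _
    (fun acc i => acc ++ pvH palabra.toList (palabra.toList.length : Int) i) _
    (fun acc i _ => bodyA palabra.toList (palabra.toList.length : Int) acc i)) ?_)
  rw [PySem.List.foldl_append_eq_flatMap, PySem.List.pyRange_zero_natCast, List.flatMap_map]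
  simp

-- B: one step of altGo agrees with pvSpec on the peeled run
lemma run_step : ∀ (t : List Char) (c : Char),
    pvSpec (c :: t)
    = (if altVoc.contains c then
         (c :: t.take (altK (altVoc.contains c) t)) ++
           ['p', (c :: t.take (altK (altVoc.contains c) t)).getLastD ' ']
       else c :: t.take (altK (altVoc.contains c) t))
      ++ pvSpec (t.drop (altK (altVoc.contains c) t)) := by
  intro t
  induction t with
  | nil =>
    intro c
    have e : (List.contains ['a','e','i','o','u'] c) = altVoc.contains c := rfl
    simp only [pvSpec, pvE, List.head?_nil, altK, List.take_nil, List.drop_nil, e]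
    cases hc : altVoc.contains c
    · simp [hc]
    · simp [hc]
  | cons d t' ih =>
    intro c
    have e : ∀ x : Char, (List.contains ['a','e','i','o','u'] x) = altVoc.contains x :=
      fun _ => rfl
    by_cases hd : altVoc.contains d = altVoc.contains c
    · have hk : altK (altVoc.contains c) (d :: t') = altK (altVoc.contains c) t' + 1 := by
        simp only [altK]; rw [if_pos hd]
      have ihd := ih d
      rw [hd] at ihd
      rw [hk]
      simp only [List.take_succ_cons, List.drop_succ_cons]
      by_cases hcv : altVoc.contains c = true
      · have hdv : altVoc.contains d = true := hd.trans hcv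
        have hE : pvE c (some d) = [c] := by
          simp only [pvE, e, hdv, hcv]; simp
        rw [if_pos hcv] at ihd ⊢
        show pvE c (d :: t').head? ++ pvSpec (d :: t') = _
        rw [List.head?_cons, hE, ihd]
        simp
      · have hcf : altVoc.contains c = false := by simpa using hcv
        have hE : pvE c (some d) = [c] := by
          simp only [pvE, e, hcf]; simp
        rw [if_neg hcv] at ihd ⊢
        show pvE c (d :: t').head? ++ pvSpec (d :: t') = _
        rw [List.head?_cons, hE, ihd]
        simp
    · have hk : altK (altVoc.contains c) (d :: t') = 0 := by
        simp only [altK]; rw [if_neg hd]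
      rw [hk]
      simp only [List.take_zero, List.drop_zero]
      by_cases hcv : altVoc.contains c = true
      · have hdv : altVoc.contains d = false := by
          cases h2 : altVoc.contains d
          · rfl
          · exact absurd (h2.trans hcv.symm) hd
        have hE : pvE c (some d) = [c, 'p', c] := by
          simp only [pvE, e, hdv, hcv]; simp
        rw [if_pos hcv]
        show pvE c (d :: t').head? ++ pvSpec (d :: t') = _
        rw [List.head?_cons, hE]
        simp
      · have hcf : altVoc.contains c = false := by simpa using hcv
        have hE : pvE c (some d) = [c] := by
          simp only [pvE, e, hcf]; simp
        rw [if_neg hcv]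
        show pvE c (d :: t').head? ++ pvSpec (d :: t') = _
        rw [List.head?_cons, hE]

-- altGo computes pvSpec
lemma go_eq_spec : ∀ n (cs : List Char), cs.length ≤ n → altGo cs = pvSpec cs := by
  intro n
  induction n with
  | zero =>
    intro cs h
    have : cs = [] := List.eq_nil_of_length_eq_zero (Nat.le_zero.mp h)
    subst this; simp [altGo, pvSpec]
  | succ m ih =>
    intro cs h
    cases cs with
    | nil => simp [altGo, pvSpec]
    | cons c t =>
      rw [altGo]
      have hdroplen : ((c :: t).drop (1 + altK (altVoc.contains c) t)).length ≤ m := by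
        simp only [List.length_drop, List.length_cons]
        simp at h
        omega
      rw [ih _ hdroplen]
      have htake : (c :: t).take (1 + altK (altVoc.contains c) t)
          = c :: t.take (altK (altVoc.contains c) t) := by
        rw [Nat.add_comm]; rfl
      have hdrop : (c :: t).drop (1 + altK (altVoc.contains c) t)
          = t.drop (altK (altVoc.contains c) t) := by
        rw [Nat.add_comm]; rfl
      rw [htake, hdrop, run_step t c]

-- ===== VERDICT (by name: the statement is the Claim_ definition above) =====
theorem geringoso_spec : Claim_equal_geringoso := by
  intro palabra _
  unfold Spec_geringoso
  have hB : geringoso_alt palabra = String.ofList (pvSpec palabra.toList) := by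
    unfold geringoso_alt
    exact congrArg String.ofList (go_eq_spec palabra.toList.length palabra.toList le_rfl)
  rw [hB, A_eq, flat_eq_spec]
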